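-- pv_equiv track=rewrite | github.com/ousama123/PythonOnlineProblems | AOF/AdventOfCode/2021/day7/day7.py | part1
-- ===== SOURCE A (Python) =====
-- def part1(positions):
--     positions = sorted(positions)
--     pos_sum=0
--     fuel_sums=[]
--     #TODO update to median value instead
--     for pos in positions:
--         pos_sum=0
--         for pos2 in positions:
--             pos_sum+= abs(pos2 - pos)
--         fuel_sums.append(pos_sum)
--
--     return fuel_sums
-- ===== SOURCE B (Python) =====
-- def part1(positions):
--     s = sorted(positions)
--     n = len(s)
--     pre = [0] * (n + 1)
--     for i, p in enumerate(s):
--         pre[i + 1] = pre[i] + p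
--     total = pre[n]
--     out = []
--     for i, p in enumerate(s):
--         out.append(p * i - pre[i] + (total - pre[i + 1]) - p * (n - 1 - i))
--     return out
-- ===== Notes on version B (the rewrite author's own statement) =====
-- stated objective: faster
-- what changed: replaced the nested scan over all pairs with a sort plus prefix-sum array, computing each distance-sum in O(1) from the sums of smaller and larger elements
import Mathlib
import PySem

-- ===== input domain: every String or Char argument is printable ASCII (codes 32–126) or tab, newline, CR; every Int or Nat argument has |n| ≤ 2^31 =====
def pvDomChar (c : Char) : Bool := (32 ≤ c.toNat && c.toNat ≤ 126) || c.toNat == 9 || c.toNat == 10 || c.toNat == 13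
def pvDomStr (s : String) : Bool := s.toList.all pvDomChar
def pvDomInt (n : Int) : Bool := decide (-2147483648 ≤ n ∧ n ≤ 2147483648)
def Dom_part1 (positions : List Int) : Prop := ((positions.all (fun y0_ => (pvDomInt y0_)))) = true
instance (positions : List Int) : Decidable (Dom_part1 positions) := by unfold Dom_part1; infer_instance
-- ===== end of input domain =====

-- B replaces A's quadratic nested scan by a sort + prefix-sum array (objective: faster, asymptotic).


-- ===== PORT A =====
-- literal port: sort, then for each pos an inner pass summing |pos2 - pos|, appending to fuel_sums
def part1 (positions : List Int) : List Int :=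
  let positions' := PySem.List.sorted positions (fun x => x) false
  positions'.foldl (fun fuel_sums pos =>
    fuel_sums ++ [positions'.foldl (fun pos_sum pos2 => pos_sum + |pos2 - pos|) 0]) []

-- ===== PORT B =====
-- port of Source B: sort, prefix sums (the Source B loop 'pre[i+1] = pre[i] + p' is the scanl of (+)),
-- then one enumerate pass reading each answer off the prefix sums
def part1_alt (positions : List Int) : List Int :=
  let s := PySem.List.sorted positions (fun x => x) false
  let n : Int := s.length
  let pre : List Int := List.scanl (· + ·) 0 s
  let total : Int := PySem.List.pyGetD pre n 0
  (PySem.List.enumerate s).map (fun ip =>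
    ip.2 * ip.1 - PySem.List.pyGetD pre ip.1 0
      + (total - PySem.List.pyGetD pre (ip.1 + 1) 0) - ip.2 * (n - 1 - ip.1))

-- ===== PRECONDITION & SPEC =====
def Spec_part1 (positions : List Int) (out : List Int) : Prop := out = part1_alt positions
instance (positions : List Int) (out : List Int) : Decidable (Spec_part1 positions out) := by unfold Spec_part1; infer_instance

-- ===== CLAIM (what is proved, stated in full; the proofs are below) =====
def Claim_equal_part1 : Prop := ∀ (positions : List Int), Dom_part1 positions → Spec_part1 positions (part1 positions)

-- ===== LEMMAS AND PROOFS =====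

-- A's outer loop appends one value per element: it is a map
theorem foldl_append_singleton {α β : Type} (f : α → β) :
    ∀ (l : List α) (init : List β),
      l.foldl (fun acc x => acc ++ [f x]) init = init ++ l.map f := by
  intro l
  induction l with
  | nil => simp
  | cons x xs ih => intro init; simp [List.foldl, ih]

-- A's inner loop is a sum
theorem foldl_add_abs {α : Type} (f : α → Int) :
    ∀ (l : List α) (c : Int), l.foldl (fun a x => a + f x) c = c + (l.map f).sum := by
  intro l
  induction l with
  | nil => simp
  | cons x xs ih => intro c; simp [List.foldl, ih]; ring

-- prefix-sum array: pre[k] is the sum of the first k elements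
theorem scanl_getD (s : List Int) : ∀ (a : Int) (k : Nat), k ≤ s.length →
    (List.scanl (· + ·) a s).getD k 0 = a + (s.take k).sum := by
  induction s with
  | nil =>
      intro a k hk
      have : k = 0 := by simpa using hk
      subst this; simp
  | cons x xs ih =>
      intro a k hk
      cases k with
      | zero => simp
      | succ k =>
          rw [List.scanl_cons]
          simp only [List.getD, List.getElem?_cons_succ, List.take_succ_cons, List.sum_cons]
          have := ih (a + x) k (by simpa using hk)
          simp only [List.getD] at this
          rw [this]; ring

-- the closed form for a sum of absolute distances about a pivot, split at the pivot
theorem sum_abs_le (p : Int) : ∀ (l : List Int), (∀ x ∈ l, x ≤ p) →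
    (l.map (fun q => |q - p|)).sum = p * l.length - l.sum := by
  intro l
  induction l with
  | nil => simp
  | cons x xs ih =>
      intro h
      have hx : x ≤ p := h x (by simp)
      have := ih (fun y hy => h y (by simp [hy]))
      simp only [List.map_cons, List.sum_cons, List.length_cons, this]
      rw [abs_of_nonpos (by omega)]
      push_cast; ring

theorem sum_abs_ge (p : Int) : ∀ (l : List Int), (∀ x ∈ l, p ≤ x) →
    (l.map (fun q => |q - p|)).sum = l.sum - p * l.length := by
  intro l
  induction l with
  | nil => simp
  | cons x xs ih =>
      intro h
      have hx : p ≤ x := h x (by simp)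
      have := ih (fun y hy => h y (by simp [hy]))
      simp only [List.map_cons, List.sum_cons, List.length_cons, this]
      rw [abs_of_nonneg (by omega)]
      push_cast; ring

theorem sum_abs_split (l1 l2 : List Int) (p : Int)
    (h1 : ∀ x ∈ l1, x ≤ p) (h2 : ∀ y ∈ l2, p ≤ y) :
    ((l1 ++ p :: l2).map (fun q => |q - p|)).sum
      = p * l1.length - l1.sum + (l2.sum - p * l2.length) := by
  rw [List.map_append, List.sum_append, List.map_cons, List.sum_cons,
    sum_abs_le p l1 h1, sum_abs_ge p l2 h2]
  simp

theorem part1_spec_aux (positions : List Int) :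
    part1 positions = part1_alt positions := by
  unfold part1 part1_alt
  set s := PySem.List.sorted positions (fun x => x) false with hs_def
  have hs : s.Pairwise (fun a b => a ≤ b) := PySem.List.sorted_pairwise positions (fun x => x)
  rw [foldl_append_singleton]
  simp only [List.nil_append]
  apply List.ext_getElem
  · simp [PySem.List.length_enumerate]
  intro k hk hk'
  have hkn : k < s.length := by simpa using hk
  simp only [List.getElem_map, PySem.List.getElem_enumerate]
  rw [foldl_add_abs]
  simp only [zero_add]
  -- decompose s at index k
  obtain ⟨p, hp⟩ : ∃ p, s[k] = p := ⟨_, rfl⟩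
  set l1 := s.take k with hl1
  set l2 := s.drop (k + 1) with hl2
  have hsplit : s = l1 ++ p :: l2 := by
    rw [hl1, hl2, ← hp]
    conv_lhs => rw [← List.take_append_drop k s]
    rw [List.drop_eq_getElem_cons hkn]
  have hlen1 : l1.length = k := by simp [hl1]; omega
  have hlenn : (s.length : Int) = (k : Int) + 1 + l2.length := by
    have : s.length = l1.length + 1 + l2.length := by rw [hsplit]; simp; omega
    rw [this, hlen1]; push_cast; ring
  -- order facts
  rw [hsplit] at hs
  rw [List.pairwise_append] at hs
  obtain ⟨_, hpl2, hcross⟩ := hs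
  have h1 : ∀ x ∈ l1, x ≤ p := fun x hx => hcross x hx p (by simp)
  have h2 : ∀ y ∈ l2, p ≤ y := (List.pairwise_cons.mp hpl2).1
  -- left side
  rw [hp]
  conv_lhs => rw [hsplit]
  rw [sum_abs_split l1 l2 p h1 h2]
  -- right side: evaluate the prefix-sum lookups
  have e0 : PySem.List.pyGetD (List.scanl (· + ·) 0 s) (s.length : Int) 0 = s.sum := by
    rw [PySem.List.pyGetD_natCast, scanl_getD s 0 s.length le_rfl]
    simp
  have ek : PySem.List.pyGetD (List.scanl (· + ·) 0 s) ((k : Nat) : Int) 0 = l1.sum := by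
    rw [
      PySem.List.pyGetD_natCast, scanl_getD s 0 k (le_of_lt hkn)]
    simp [hl1]
  have ek1 : PySem.List.pyGetD (List.scanl (· + ·) 0 s) (((k : Nat) : Int) + 1) 0
      = l1.sum + p := by
    rw [show (((k : Nat) : Int) + 1) = (((k + 1 : Nat)) : Int) by push_cast; ring,
      PySem.List.pyGetD_natCast, scanl_getD s 0 (k + 1) (by omega)]
    rw [List.sum_take_succ s k hkn, hp]
    simp [hl1]
  rw [e0, ek, ek1]
  have hsum : s.sum = l1.sum + p + l2.sum := by
    conv_lhs => rw [hsplit]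
    simp; ring
  rw [hsum, hlenn, hlen1]
  ring

-- ===== VERDICT (by name: the statement is the Claim_ definition above) =====
theorem part1_spec : Claim_equal_part1 := by
  intro positions _
  exact part1_spec_aux positions
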